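-- pv_equiv track=rewrite | github.com/Gunner-Bones/Finish-Part-Bot | fb.py | paramnumberlist
-- ===== SOURCE A (Python) =====
-- def paramnumberlist(p):
--     params = []; i = -1; tempparam = [""]; inquotations = False; addingdone = True
--     while True:
--         try:
--             i += 1
--             tp = int(p[i])
--             if not inquotations:
--                 addingdone = False
--                 tempparam[0] += str(tp)
--         except ValueError:
--             if p[i] == "\"":
--                 if inquotations: inquotations = False
--                 elif not inquotations: inquotations = True
--             if p[i] == " " and not inquotations and not addingdone:
--                 params.append(int(tempparam[0]))
--                 tempparam[0] = ""
--                 addingdone = True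
--         except IndexError:
--             if not addingdone:
--                 params.append(int(tempparam[0]))
--                 tempparam[0] = ""
--             if params == []: return None
--             return params
-- ===== SOURCE B (Python) =====
-- def paramnumberlist(p):
--     # pass 1: drop quote characters and everything inside quoted sections
--     kept = []
--     inq = False
--     for ch in p:
--         if ch == '"':
--             inq = not inq
--         elif not inq:
--             kept.append(ch)
--     # pass 2: per space-separated token, collect its digit characters; a token
--     # with at least one digit contributes one number
--     res = []
--     for token in ''.join(kept).split(' '):
--         digits = ""
--         for ch in token:
--             try:
--                 digits += str(int(ch))
--             except ValueError:
--                 pass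
--         if digits:
--             res.append(int(digits))
--     return res if res else None
-- ===== Notes on version B (the rewrite author's own statement) =====
-- stated objective: simpler
-- what changed: A's single stateful scan (quote flag, adding-done flag, running buffer, flush-on-space, try/except control flow) is replaced by two independent passes: first strip quote characters and quoted sections, then split the remainder on spaces and turn each token's digit characters into one number.
import Mathlib
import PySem

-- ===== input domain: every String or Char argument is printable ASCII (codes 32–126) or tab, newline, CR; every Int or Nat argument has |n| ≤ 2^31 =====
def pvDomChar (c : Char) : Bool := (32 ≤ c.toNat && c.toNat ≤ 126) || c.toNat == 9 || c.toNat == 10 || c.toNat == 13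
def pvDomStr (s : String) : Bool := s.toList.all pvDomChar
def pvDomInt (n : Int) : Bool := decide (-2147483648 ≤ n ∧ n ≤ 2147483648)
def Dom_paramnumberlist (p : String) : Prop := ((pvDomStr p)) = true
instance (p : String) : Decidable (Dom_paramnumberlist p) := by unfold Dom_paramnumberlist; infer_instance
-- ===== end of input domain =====

-- B replaces A's single stateful scan by two passes (strip quoted parts, then split on spaces
-- and read each token's digits); objective: simpler.

-- ===== PORT A =====
-- A's `while True` with `i += 1` / try-int / except ValueError / except IndexError, as structural
-- recursion over the remaining characters with A's state (params, tempparam[0], inquotations,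
-- addingdone).  `int(p[i])` on one character is PySem.Int.ofChars? [c] (none = ValueError);
-- `int(tempparam[0])` is only reached with addingdone = false, where tempparam[0] is a nonempty
-- digit string, so the `.getD 0` default is never used.  A's `if inquotations: … elif not
-- inquotations: …` toggle is the negation.
def pvGoA : List Char → List Int → List Char → Bool → Bool → Option (List Int)
  | [], params, temp, _inq, ad =>
      -- except IndexError: final flush, then return None on empty
      let params := if !ad then params ++ [(PySem.Int.ofChars? temp).getD 0] else params
      if params = [] then none else some params
  | c :: rest, params, temp, inq, ad =>
      match PySem.Int.ofChars? [c] with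
      | some tp =>
          if !inq then pvGoA rest params (temp ++ PySem.Int.toChars tp) inq false
          else pvGoA rest params temp inq ad
      | none =>
          let inq' := if c = '"' then !inq else inq
          if c = ' ' && !inq' && !ad then
            pvGoA rest (params ++ [(PySem.Int.ofChars? temp).getD 0]) [] inq' true
          else pvGoA rest params temp inq' ad

def paramnumberlist (p : String) : Option (List Int) := pvGoA p.toList [] [] false true

-- ===== PORT B =====
-- pass 1: the `for ch in p` loop with accumulator (kept, inq)
def pvPass1 (p : List Char) : List Char :=
  (p.foldl (fun (st : List Char × Bool) c =>
      if c = '"' then (st.1, !st.2)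
      else if st.2 then st
      else (st.1 ++ [c], st.2)) ([], false)).1

-- the inner `for ch in token` loop building `digits` (try int(ch) / except ValueError: pass)
def pvDigits (t : List Char) : List Char :=
  t.foldl (fun ds c =>
      match PySem.Int.ofChars? [c] with
      | some v => ds ++ PySem.Int.toChars v
      | none => ds) []

-- pass 2: `''.join(kept).split(' ')`, one append per token with digits; `int(digits)` is only
-- reached on a nonempty digit string, so the `.getD 0` default is never used.
def paramnumberlist_alt (p : String) : Option (List Int) :=
  let kept := pvPass1 p.toList
  let res := (PySem.Chars.splitOn kept [' ']).foldl
      (fun res t =>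
        let ds := pvDigits t
        if ds = [] then res else res ++ [(PySem.Int.ofChars? ds).getD 0]) []
  if res = [] then none else some res

-- ===== PRECONDITION & SPEC =====
def Spec_paramnumberlist (p : String) (out : Option (List Int)) : Prop := out = paramnumberlist_alt p
instance (p : String) (out : Option (List Int)) : Decidable (Spec_paramnumberlist p out) := by unfold Spec_paramnumberlist; infer_instance

-- ===== CLAIM (what is proved, stated in full; the proofs are below) =====
def Claim_equal_paramnumberlist : Prop := ∀ (p : String), Dom_paramnumberlist p → Spec_paramnumberlist p (paramnumberlist p)

-- ===== LEMMAS AND PROOFS =====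

-- the value appended at a flush
def pvVal (ds : List Char) : Int := (PySem.Int.ofChars? ds).getD 0
-- final None-on-empty
def pvFin (ps : List Int) : Option (List Int) := if ps = [] then none else some ps
-- the digit contribution of one character
def pvGd (c : Char) : List Char :=
  match PySem.Int.ofChars? [c] with
  | some v => PySem.Int.toChars v
  | none => []
def pvFlush (params : List Int) (ds : List Char) : List Int :=
  if ds = [] then params else params ++ [pvVal ds]
def pvBstep (res : List Int) (t : List Char) : List Int := pvFlush res (t.flatMap pvGd)

-- quote-free scan: the common intermediate form
def pvF : List Char → List Int → List Char → Option (List Int)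
  | [], params, ds => pvFin (pvFlush params ds)
  | c :: rest, params, ds =>
      match PySem.Int.ofChars? [c] with
      | some v => pvF rest params (ds ++ PySem.Int.toChars v)
      | none =>
          if c = ' ' then pvF rest (pvFlush params ds) []
          else pvF rest params ds

-- recursive form of pass 1, starting in quote state inq
def pvUnqF : Bool → List Char → List Char
  | _, [] => []
  | inq, c :: rest =>
      if c = '"' then pvUnqF (!inq) rest
      else if inq then pvUnqF inq rest
      else c :: pvUnqF inq rest

-- recursive form of `.split(' ')`
def pvSplitAux : List Char → List Char → List (List Char)
  | cur, [] => [cur]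
  | cur, c :: rest => if c = ' ' then cur :: pvSplitAux [] rest else pvSplitAux (cur ++ [c]) rest

lemma pvToChars_ne_nil (v : Int) : PySem.Int.toChars v ≠ [] := by
  unfold PySem.Int.toChars
  split
  · simp
  · have h : 0 < (Nat.toDigits 10 v.toNat).length := Nat.length_toDigits_pos
    intro hc
    rw [hc] at h
    simp at h

lemma pvSpace_not_digit : PySem.Int.ofChars? [' '] = none := by decide

lemma pvPass1_eq (cs : List Char) (acc : List Char) (inq : Bool) :
    (cs.foldl (fun (st : List Char × Bool) c =>
      if c = '"' then (st.1, !st.2)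
      else if st.2 then st
      else (st.1 ++ [c], st.2)) (acc, inq)).1 = acc ++ pvUnqF inq cs := by
  induction cs generalizing acc inq with
  | nil => simp [pvUnqF]
  | cons c rest ih =>
      by_cases hq : c = '"'
      · simp [List.foldl_cons, hq, pvUnqF, ih]
      · by_cases hi : inq = true
        · simp [List.foldl_cons, hq, hi, pvUnqF, ih]
        · simp at hi
          simp [List.foldl_cons, hq, hi, pvUnqF, ih]

lemma pvSplitOn_go_eq (l : List Char) : ∀ (fuel : Nat) (cur : List Char) (acc : List (List Char)),
    l.length ≤ fuel →
    PySem.Chars.splitOn.go [' '] fuel l cur acc = acc.reverse ++ pvSplitAux cur.reverse l := by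
  induction l with
  | nil =>
      intro fuel cur acc _
      cases fuel <;> simp [PySem.Chars.splitOn.go, pvSplitAux]
  | cons c rest ih =>
      intro fuel cur acc hlen
      cases fuel with
      | zero => simp at hlen
      | succ n =>
          rw [PySem.Chars.splitOn.go]
          by_cases hs : c = ' '
          · subst hs
            have hp : [' '].isPrefixOf (' ' :: rest) = true := by simp [List.isPrefixOf]
            rw [if_pos hp]
            have hdrop : List.drop [' '].length (' ' :: rest) = rest := by simp
            rw [hdrop]
            simp only [List.length_cons] at hlen
            rw [ih n [] ((cur.reverse) :: acc) (by omega)]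
            simp [pvSplitAux]
          · have hp : [' '].isPrefixOf (c :: rest) = false := by
              simp [List.isPrefixOf]
              exact fun h => absurd h.symm hs
            rw [if_neg (by simp [hp])]
            simp only [List.length_cons] at hlen
            rw [ih n (c :: cur) acc (by omega)]
            simp [pvSplitAux, hs]

lemma pvSplitOn_eq (l : List Char) : PySem.Chars.splitOn l [' '] = pvSplitAux [] l := by
  rw [PySem.Chars.splitOn, pvSplitOn_go_eq l (l.length + 1) [] [] (by omega)]
  simp

lemma pvSplitAux_shape (u : List Char) :
    ∃ t ts, pvSplitAux [] u = t :: ts ∧ ∀ cur, pvSplitAux cur u = (cur ++ t) :: ts := by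
  induction u with
  | nil => exact ⟨[], [], rfl, fun cur => by simp [pvSplitAux]⟩
  | cons c rest ih =>
      by_cases hs : c = ' '
      · exact ⟨[], pvSplitAux [] rest, by simp [pvSplitAux, hs],
          fun cur => by simp [pvSplitAux, hs]⟩
      · obtain ⟨t, ts, h1, h2⟩ := ih
        refine ⟨c :: t, ts, ?_, fun cur => ?_⟩
        · show pvSplitAux [] (c :: rest) = _
          rw [pvSplitAux, if_neg hs, h2]
          simp
        · rw [pvSplitAux, if_neg hs, h2]
          simp

lemma pvDigits_eq (t : List Char) (ds : List Char) :
    t.foldl (fun ds c =>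
      match PySem.Int.ofChars? [c] with
      | some v => ds ++ PySem.Int.toChars v
      | none => ds) ds = ds ++ t.flatMap pvGd := by
  have h : ∀ (acc : List Char) (c : Char),
      (match PySem.Int.ofChars? [c] with
      | some v => acc ++ PySem.Int.toChars v
      | none => acc) = acc ++ pvGd c := by
    intro acc c
    unfold pvGd
    cases PySem.Int.ofChars? [c] <;> simp
  calc t.foldl _ ds = t.foldl (fun acc c => acc ++ pvGd c) ds := by
        apply PySem.List.foldl_congr_mem
        intro acc x _
        exact h acc x
    _ = ds ++ t.flatMap pvGd := PySem.List.foldl_append_eq_flatMap pvGd t ds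

-- Stage 1: A's scan equals the quote-free scan on the unquoted characters
lemma pvStage1 (cs : List Char) : ∀ (params : List Int) (ds : List Char) (inq : Bool),
    pvGoA cs params ds inq ds.isEmpty = pvF (pvUnqF inq cs) params ds := by
  induction cs with
  | nil =>
      intro params ds inq
      cases ds <;> simp [pvGoA, pvUnqF, pvF, pvFin, pvFlush, pvVal]
  | cons c rest ih =>
      intro params ds inq
      rcases hd : PySem.Int.ofChars? [c] with _ | v
      · -- ValueError branch
        by_cases hq : c = '"'
        · subst hq
          cases inq <;>
            simp [pvGoA, pvUnqF, pvF, hd, ih]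
        · by_cases hs : c = ' '
          · subst hs
            cases inq with
            | true => simp [pvGoA, pvUnqF, hd, hq, ih]
            | false =>
                by_cases hds : ds = []
                · subst hds
                  simp [pvGoA, pvUnqF, pvF, hd, hq, pvFlush]
                  simpa using ih params [] false
                · have hds' : ds.isEmpty = false := by simp [hds]
                  simp [pvGoA, pvUnqF, pvF, hd, hq, hds', pvFlush, hds, pvVal]
                  simpa using ih (params ++ [(PySem.Int.ofChars? ds).getD 0]) [] false
          · -- ordinary non-digit character
            cases inq <;>
              simp [pvGoA, pvUnqF, pvF, hd, hq, hs, ih]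
      · -- digit character
        have hq : c ≠ '"' := by
          intro h; subst h
          rw [(by decide : PySem.Int.ofChars? ['"'] = none)] at hd
          exact absurd hd (by simp)
        cases inq with
        | true => simp [pvGoA, pvUnqF, hd, hq, ih]
        | false =>
            have hne : (ds ++ PySem.Int.toChars v).isEmpty = false := by
              simp [pvToChars_ne_nil]
            have h2 := ih params (ds ++ PySem.Int.toChars v) false
            rw [hne] at h2
            simp [pvGoA, pvUnqF, pvF, hd, hq, h2]

-- Stage 2: the quote-free scan equals the token fold
lemma pvStage2 (u : List Char) : ∀ (params : List Int) (ds : List Char),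
    pvF u params ds =
      pvFin ((pvSplitAux [] u).tail.foldl pvBstep
        (pvFlush params (ds ++ ((pvSplitAux [] u).headI).flatMap pvGd))) := by
  induction u with
  | nil =>
      intro params ds
      simp [pvF, pvSplitAux, List.headI]
  | cons c rest ih =>
      intro params ds
      obtain ⟨t, ts, h1, h2⟩ := pvSplitAux_shape rest
      rcases hd : PySem.Int.ofChars? [c] with _ | v
      · by_cases hs : c = ' '
        · subst hs
          rw [pvF]
          simp only [hd, if_pos rfl]
          rw [ih (pvFlush params ds) [], h1]
          have hsp : pvSplitAux [] (' ' :: rest) = [] :: t :: ts := by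
            rw [pvSplitAux, if_pos rfl, h1]
          rw [hsp]
          simp [pvBstep, List.headI, List.foldl_cons]
        · rw [pvF]
          simp only [hd, if_neg hs]
          rw [ih params ds, h1]
          have hsp : pvSplitAux [] (c :: rest) = (c :: t) :: ts := by
            rw [pvSplitAux, if_neg hs, h2]
            simp
          rw [hsp]
          have : (c :: t).flatMap pvGd = t.flatMap pvGd := by
            simp [pvGd, hd]
          simp [List.headI, this]
      · have hs : c ≠ ' ' := by
          intro h; subst h; rw [pvSpace_not_digit] at hd; exact absurd hd (by simp)
        rw [pvF]
        simp only [hd]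
        rw [ih params (ds ++ PySem.Int.toChars v), h1]
        have hsp : pvSplitAux [] (c :: rest) = (c :: t) :: ts := by
          rw [pvSplitAux, if_neg hs, h2]
          simp
        rw [hsp]
        have hgd : (c :: t).flatMap pvGd = PySem.Int.toChars v ++ t.flatMap pvGd := by
          simp [pvGd, hd]
        simp [List.headI, hgd]

-- ===== VERDICT (by name: the statement is the Claim_ definition above) =====
theorem paramnumberlist_spec : Claim_equal_paramnumberlist := by
  intro p _
  unfold Spec_paramnumberlist paramnumberlist paramnumberlist_alt
  rw [pvPass1, pvPass1_eq p.toList [] false]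
  simp only [List.nil_append]
  have h1 : pvGoA p.toList [] [] false true = pvF (pvUnqF false p.toList) [] [] := by
    simpa using pvStage1 p.toList [] [] false
  rw [h1, pvStage2 (pvUnqF false p.toList) [] []]
  obtain ⟨t, ts, hsp, _⟩ := pvSplitAux_shape (pvUnqF false p.toList)
  rw [pvSplitOn_eq, hsp]
  have hfold : ∀ (toks : List (List Char)) (init : List Int),
      toks.foldl (fun res t =>
        let ds := pvDigits t
        if ds = [] then res else res ++ [(PySem.Int.ofChars? ds).getD 0]) init
      = toks.foldl pvBstep init := by
    intro toks init
    apply PySem.List.foldl_congr_mem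
    intro acc x _
    simp only [pvBstep, pvFlush, pvVal, pvDigits, pvDigits_eq x []]
    simp
  rw [hfold, List.foldl_cons]
  have hb : pvBstep [] t = pvFlush [] ([] ++ t.flatMap pvGd) := by simp [pvBstep]
  rw [hb]
  simp [List.headI, pvFin]
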